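-- pv_equiv track=rewrite | github.com/philippmuench/operon_analysis_pipeline | 08_start_site_analysis/analyze_ptsA_upstream.py | find_rbs
-- ===== SOURCE A (Python) =====
-- from typing import Dict, List, Optional, Tuple
--
-- RBS_MOTIFS = ["AGGAGG", "GGAGG", "AGGA", "GGAG", "GAGG"]
--
-- def find_rbs(seq_upstream: str, rbs_min_spacer: int, rbs_max_spacer: int) -> Tuple[Optional[str], Optional[int], Optional[int]]:
--     best = (None, None, None)
--     best_mism = None
--     region = seq_upstream  # string where index 0 is immediately upstream
--     for spacer in range(rbs_min_spacer, rbs_max_spacer + 1):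
--         for motif in RBS_MOTIFS:
--             mlen = len(motif)
--             if spacer + mlen <= len(region):
--                 window = region[spacer: spacer + mlen]
--                 mism = sum(1 for x, y in zip(window, motif) if x != y)
--                 if mism <= 1 and (best_mism is None or mism < best_mism):
--                     best = (window, spacer, mism)
--                     best_mism = mism
--     return best
-- ===== SOURCE B (Python) =====
-- RBS_MOTIFS = ["AGGAGG", "GGAGG", "AGGA", "GGAG", "GAGG"]
--
-- def find_rbs(seq_upstream: str, rbs_min_spacer: int, rbs_max_spacer: int):
--     # Staged search by mismatch level: pass 0 collects all exact-match windows,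
--     # pass 1 collects all 1-mismatch windows; answer = first hit of the best level.
--     def hits(allowed):
--         return [(seq_upstream[sp:sp + len(m)], sp, allowed)
--                 for sp in range(rbs_min_spacer, rbs_max_spacer + 1)
--                 for m in RBS_MOTIFS
--                 if sp + len(m) <= len(seq_upstream)
--                 and sum(x != y for x, y in zip(seq_upstream[sp:sp + len(m)], m)) == allowed]
--     for level in (0, 1):
--         found = hits(level)
--         if found:
--             return found[0]
--     return (None, None, None)
-- ===== Notes on version B (the rewrite author's own statement) =====
-- stated objective: alternative
-- what changed: A makes one pass keeping a running best with a strict-less argmin update; B has no running best at all: it performs two staged full passes, materialising the list of exact-match (mismatch 0) windows and, only if that list is empty, the list of 1-mismatch windows, returning the head of the first nonempty stage.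
import Mathlib
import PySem

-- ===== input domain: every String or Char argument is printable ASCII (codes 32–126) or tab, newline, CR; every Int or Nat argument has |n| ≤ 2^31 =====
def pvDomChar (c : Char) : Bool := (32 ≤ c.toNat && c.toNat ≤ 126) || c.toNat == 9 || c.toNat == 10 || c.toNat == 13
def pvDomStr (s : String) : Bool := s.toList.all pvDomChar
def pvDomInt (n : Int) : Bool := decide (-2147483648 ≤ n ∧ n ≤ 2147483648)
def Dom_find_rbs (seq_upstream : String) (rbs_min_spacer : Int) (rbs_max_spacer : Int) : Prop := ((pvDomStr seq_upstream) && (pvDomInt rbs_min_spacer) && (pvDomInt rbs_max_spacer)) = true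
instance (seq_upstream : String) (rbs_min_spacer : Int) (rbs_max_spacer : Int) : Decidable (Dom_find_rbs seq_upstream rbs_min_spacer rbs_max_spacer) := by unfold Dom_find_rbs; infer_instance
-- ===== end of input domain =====

-- B replaces A's single running-argmin pass by two staged passes: materialise all
-- exact-match windows, else all 1-mismatch windows, and take the head; objective: alternative.

-- ===== PORT A =====
def rbsMotifs : List (List Char) :=
  ["AGGAGG".toList, "GGAGG".toList, "AGGA".toList, "GGAG".toList, "GAGG".toList]

-- window = region[spacer : spacer+len(motif)] (PySem slice, exact Python semantics)
def rbsWindow (region : List Char) (spacer : Int) (motif : List Char) : List Char :=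
  PySem.List.slice region (some spacer) (some (spacer + (motif.length : Int)))

-- mism = sum(1 for x, y in zip(window, motif) if x != y)
def rbsMism (window motif : List Char) : Int :=
  ((window.zip motif).countP fun p => p.1 ≠ p.2 : Nat)

-- one inner-loop body of A: state = (best triple, best_mism)
def rbsStepA (region : List Char) (spacer : Int)
    (st : (Option String × Option Int × Option Int) × Option Int) (motif : List Char) :
    (Option String × Option Int × Option Int) × Option Int :=
  if spacer + (motif.length : Int) ≤ (region.length : Int) then
    if rbsMism (rbsWindow region spacer motif) motif ≤ 1 ∧
        (st.2 = none ∨ ∃ b, st.2 = some b ∧ rbsMism (rbsWindow region spacer motif) motif < b) then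
      ((some (String.ofList (rbsWindow region spacer motif)), some spacer,
        some (rbsMism (rbsWindow region spacer motif) motif)),
       some (rbsMism (rbsWindow region spacer motif) motif))
    else st
  else st

def find_rbs (seq_upstream : String) (rbs_min_spacer : Int) (rbs_max_spacer : Int) :
    Option String × Option Int × Option Int :=
  ((PySem.List.pyRange rbs_min_spacer (rbs_max_spacer + 1) 1).foldl
      (fun st spacer => rbsMotifs.foldl (rbsStepA seq_upstream.toList spacer) st)
      ((none, none, none), none)).1

-- ===== PORT B =====
-- one element of Source B's hits(allowed) comprehension (none = a guard fails)
def rbsHitAt (region : List Char) (allowed : Int) (spacer : Int) (motif : List Char) :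
    Option (String × Int × Int) :=
  if spacer + (motif.length : Int) ≤ (region.length : Int) ∧
      rbsMism (rbsWindow region spacer motif) motif = allowed then
    some (String.ofList (rbsWindow region spacer motif), spacer, allowed)
  else none

-- Source B's hits(allowed): all windows with exactly `allowed` mismatches, in scan order
def rbsHits (region : List Char) (a b allowed : Int) : List (String × Int × Int) :=
  (PySem.List.pyRange a (b + 1) 1).flatMap fun spacer =>
    rbsMotifs.filterMap (rbsHitAt region allowed spacer)

-- Source B's staged loop over levels (0, 1): head of the first nonempty stage
def find_rbs_alt (seq_upstream : String) (rbs_min_spacer : Int) (rbs_max_spacer : Int) :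
    Option String × Option Int × Option Int :=
  match rbsHits seq_upstream.toList rbs_min_spacer rbs_max_spacer 0 with
  | c :: _ => (some c.1, some c.2.1, some c.2.2)
  | [] =>
    match rbsHits seq_upstream.toList rbs_min_spacer rbs_max_spacer 1 with
    | c :: _ => (some c.1, some c.2.1, some c.2.2)
    | [] => (none, none, none)

-- ===== PRECONDITION & SPEC =====
def Spec_find_rbs (seq_upstream : String) (rbs_min_spacer : Int) (rbs_max_spacer : Int) (out : Option String × Option Int × Option Int) : Prop := out = find_rbs_alt seq_upstream rbs_min_spacer rbs_max_spacer
instance (seq_upstream : String) (rbs_min_spacer : Int) (rbs_max_spacer : Int) (out : Option String × Option Int × Option Int) : Decidable (Spec_find_rbs seq_upstream rbs_min_spacer rbs_max_spacer out) := by unfold Spec_find_rbs; infer_instance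

-- ===== CLAIM (what is proved, stated in full; the proofs are below) =====
def Claim_equal_find_rbs : Prop := ∀ (seq_upstream : String) (rbs_min_spacer : Int) (rbs_max_spacer : Int), Dom_find_rbs seq_upstream rbs_min_spacer rbs_max_spacer → Spec_find_rbs seq_upstream rbs_min_spacer rbs_max_spacer (find_rbs seq_upstream rbs_min_spacer rbs_max_spacer)

-- ===== LEMMAS AND PROOFS =====

-- proof-side: the full candidate stream (no mismatch filter), in A's scan order
def rbsCandAt (region : List Char) (spacer : Int) (motif : List Char) :
    Option (String × Int × Int) :=
  if spacer + (motif.length : Int) ≤ (region.length : Int) then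
    some (String.ofList (rbsWindow region spacer motif), spacer,
          rbsMism (rbsWindow region spacer motif) motif)
  else none

def rbsCandidates (region : List Char) (a b : Int) : List (String × Int × Int) :=
  (PySem.List.pyRange a (b + 1) 1).flatMap fun spacer =>
    rbsMotifs.filterMap (rbsCandAt region spacer)

-- A's fold step restated on a materialised candidate
def rbsStepC (st : (Option String × Option Int × Option Int) × Option Int)
    (c : String × Int × Int) : (Option String × Option Int × Option Int) × Option Int :=
  if c.2.2 ≤ 1 ∧ (st.2 = none ∨ ∃ b, st.2 = some b ∧ c.2.2 < b) then
    ((some c.1, some c.2.1, some c.2.2), some c.2.2)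
  else st

-- A's inner foldl over motifs = foldl of rbsStepC over the filterMap'd candidates
theorem foldA_inner (region : List Char) (spacer : Int) (motifs : List (List Char)) (st) :
    motifs.foldl (rbsStepA region spacer) st =
      (motifs.filterMap (rbsCandAt region spacer)).foldl rbsStepC st := by
  induction motifs generalizing st with
  | nil => rfl
  | cons m rest ih =>
      by_cases h : spacer + (m.length : Int) ≤ (region.length : Int)
      · have hc : rbsCandAt region spacer m = some (String.ofList (rbsWindow region spacer m),
            spacer, rbsMism (rbsWindow region spacer m) m) := by simp [rbsCandAt, h]
        have hstep : rbsStepA region spacer st m = rbsStepC st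
            (String.ofList (rbsWindow region spacer m), spacer,
             rbsMism (rbsWindow region spacer m) m) := by
          simp [rbsStepA, rbsStepC, h]
        simp only [List.foldl_cons, List.filterMap_cons, hc, hstep]
        exact ih _
      · have hc : rbsCandAt region spacer m = none := by simp [rbsCandAt, h]
        have hstep : rbsStepA region spacer st m = st := by simp [rbsStepA, h]
        simp only [List.foldl_cons, List.filterMap_cons, hc, hstep]
        exact ih st

-- A's whole nested fold = a single fold of rbsStepC over rbsCandidates
theorem foldA_eq (region : List Char) (a b : Int) (st) :
    (PySem.List.pyRange a (b + 1) 1).foldl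
        (fun st spacer => rbsMotifs.foldl (rbsStepA region spacer) st) st =
      (rbsCandidates region a b).foldl rbsStepC st := by
  unfold rbsCandidates
  generalize PySem.List.pyRange a (b + 1) 1 = l
  induction l generalizing st with
  | nil => rfl
  | cons x rest ih =>
      simp only [List.foldl_cons, List.flatMap_cons, List.foldl_append]
      rw [foldA_inner, ih]

-- every candidate's mismatch count is a Nat cast, hence nonnegative
theorem cand_nonneg (region : List Char) (a b : Int) :
    ∀ c ∈ rbsCandidates region a b, 0 ≤ c.2.2 := by
  intro c hc
  unfold rbsCandidates at hc
  simp only [List.mem_flatMap, List.mem_filterMap] at hc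
  obtain ⟨sp, _, m, _, hm⟩ := hc
  unfold rbsCandAt at hm
  split at hm
  · cases hm; exact Int.natCast_nonneg _
  · cases hm

-- B's hits(allowed) = the candidates with mismatch exactly `allowed`
theorem hits_eq (region : List Char) (a b k : Int) :
    rbsHits region a b k =
      (rbsCandidates region a b).filterMap
        (fun c => if c.2.2 = k then some c else none) := by
  unfold rbsHits rbsCandidates
  rw [List.filterMap_flatMap]
  congr 1; funext sp
  rw [List.filterMap_filterMap]
  congr 1; funext m
  unfold rbsHitAt rbsCandAt
  by_cases h : sp + (m.length : Int) ≤ (region.length : Int)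
  · by_cases hk : rbsMism (rbsWindow region sp m) m = k
    · simp [h, hk]
    · simp [h, hk]
  · simp [h]

-- head of a filterMap'd sublist = find? of the predicate
theorem head_filterK (cands : List (String × Int × Int)) (k : Int) :
    (cands.filterMap (fun c => if c.2.2 = k then some c else none)).head? =
      cands.find? (fun c => c.2.2 == k) := by
  induction cands with
  | nil => rfl
  | cons c rest ih =>
      by_cases h : c.2.2 = k
      · simp [h]
      · simp [h, ih]

-- the staged answer, characterised via find? over the candidate stream
def rbsSelect (cands : List (String × Int × Int)) :
    Option String × Option Int × Option Int :=
  match cands.find? (fun c => c.2.2 == 0) with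
  | some c => (some c.1, some c.2.1, some c.2.2)
  | none =>
    match cands.find? (fun c => c.2.2 == 1) with
    | some c => (some c.1, some c.2.1, some c.2.2)
    | none => (none, none, none)

theorem alt_eq_select (s : String) (a b : Int) :
    find_rbs_alt s a b = rbsSelect (rbsCandidates s.toList a b) := by
  unfold find_rbs_alt rbsSelect
  rw [show rbsHits s.toList a b 0 = _ from hits_eq s.toList a b 0,
      show rbsHits s.toList a b 1 = _ from hits_eq s.toList a b 1,
      ← head_filterK (rbsCandidates s.toList a b) 0,
      ← head_filterK (rbsCandidates s.toList a b) 1]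
  generalize (rbsCandidates s.toList a b).filterMap
      (fun c => if c.2.2 = 0 then some c else none) = l0
  generalize (rbsCandidates s.toList a b).filterMap
      (fun c => if c.2.2 = 1 then some c else none) = l1
  cases l0 <;> cases l1 <;> rfl

-- once best_mism = 0 the fold never changes state again
theorem fold_zero_fix (cands : List (String × Int × Int))
    (h : ∀ c ∈ cands, 0 ≤ c.2.2) (w : String) (s : Int) :
    cands.foldl rbsStepC ((some w, some s, some 0), some 0) =
      ((some w, some s, some 0), some 0) := by
  induction cands with
  | nil => rfl
  | cons c rest ih =>
      have hc : 0 ≤ c.2.2 := h c (List.mem_cons_self ..)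
      have hstep : rbsStepC ((some w, some s, some 0), some 0) c =
          ((some w, some s, some 0), some 0) := by
        unfold rbsStepC
        rw [if_neg]
        rintro ⟨-, h2 | ⟨bb, hb, hlt⟩⟩
        · simp at h2
        · simp at hb; omega
      rw [List.foldl_cons, hstep, ih (fun c hc => h c (List.mem_cons_of_mem _ hc))]

-- from a 1-mismatch state, the fold only ever improves to an exact match
theorem fold_from_one (cands : List (String × Int × Int))
    (h : ∀ c ∈ cands, 0 ≤ c.2.2) (w : String) (s : Int) :
    (cands.foldl rbsStepC ((some w, some s, some 1), some 1)).1 =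
      match cands.find? (fun c => c.2.2 == 0) with
      | some c => (some c.1, some c.2.1, some c.2.2)
      | none => (some w, some s, some 1) := by
  induction cands generalizing w s with
  | nil => rfl
  | cons c rest ih =>
      have hrest := fun c hc => h c (List.mem_cons_of_mem _ hc)
      by_cases h0 : c.2.2 = 0
      · have hstep : rbsStepC ((some w, some s, some 1), some 1) c =
            ((some c.1, some c.2.1, some c.2.2), some c.2.2) := by
          unfold rbsStepC; rw [if_pos ⟨by omega, Or.inr ⟨1, rfl, by omega⟩⟩]
        rw [List.foldl_cons, hstep, h0, fold_zero_fix rest hrest]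
        simp [h0]
      · have hstep : rbsStepC ((some w, some s, some 1), some 1) c =
            ((some w, some s, some 1), some 1) := by
          unfold rbsStepC; rw [if_neg]
          rintro ⟨hle, h2 | ⟨bb, hb, hlt⟩⟩
          · simp at h2
          · have hc := h c (List.mem_cons_self ..)
            simp at hb; omega
        rw [List.foldl_cons, hstep, ih hrest w s]
        simp [h0]

-- from the empty state, A's fold computes exactly the staged selection
theorem fold_char (cands : List (String × Int × Int))
    (h : ∀ c ∈ cands, 0 ≤ c.2.2) :
    (cands.foldl rbsStepC ((none, none, none), none)).1 = rbsSelect cands := by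
  induction cands with
  | nil => rfl
  | cons c rest ih =>
      have hrest := fun c hc => h c (List.mem_cons_of_mem _ hc)
      have hc0 : 0 ≤ c.2.2 := h c (List.mem_cons_self ..)
      by_cases h0 : c.2.2 = 0
      · have hstep : rbsStepC ((none, none, none), none) c =
            ((some c.1, some c.2.1, some c.2.2), some c.2.2) := by
          unfold rbsStepC; rw [if_pos ⟨by omega, Or.inl rfl⟩]
        rw [List.foldl_cons, hstep, h0, fold_zero_fix rest hrest]
        simp [rbsSelect, h0]
      · by_cases h1 : c.2.2 = 1
        · have hstep : rbsStepC ((none, none, none), none) c =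
              ((some c.1, some c.2.1, some c.2.2), some c.2.2) := by
            unfold rbsStepC; rw [if_pos ⟨by omega, Or.inl rfl⟩]
          rw [List.foldl_cons, hstep, h1, fold_from_one rest hrest]
          simp only [rbsSelect, List.find?_cons, h1]
          simp [h1]
        · have hstep : rbsStepC ((none, none, none), none) c =
              ((none, none, none), none) := by
            unfold rbsStepC; rw [if_neg]
            rintro ⟨hle, -⟩; omega
          rw [List.foldl_cons, hstep, ih hrest]
          simp [rbsSelect, h0, h1]

-- ===== VERDICT (by name: the statement is the Claim_ definition above) =====
theorem find_rbs_spec : Claim_equal_find_rbs := by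
  intro s lo hi _
  unfold Spec_find_rbs find_rbs
  rw [foldA_eq, fold_char _ (cand_nonneg s.toList lo hi), alt_eq_select]
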